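-- pv_equiv track=rewrite | github.com/postvakje/oeis-sequences | oeis-sequences/OEISsequences.py | A073787
-- ===== SOURCE A (Python) =====
-- def A073787(n):
--     s, q = "", n
--     while q >= 6 or q < 0:
--         q, r = divmod(q, -6)
--         if r < 0:
--             q += 1
--             r += 6
--         s += str(r)
--     return int(str(q) + s[::-1])
-- ===== SOURCE B (Python) =====
-- def A073787(n):
--     # Recursive negabase-(-6) conversion, most-significant digit first.
--     # Digit r = q % 6 (Python's nonnegative remainder), next quotient
--     # q' = (r - q) // 6, since q = (-6)*q' + r exactly; base case 0 <= q < 6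
--     # is the leading digit.  No accumulator, no reversal, no carry fix.
--     def digs(q):
--         if 0 <= q < 6:
--             return str(q)
--         r = q % 6
--         return digs((r - q) // 6) + str(r)
--     return int(digs(n))
-- ===== Notes on version B (the rewrite author's own statement) =====
-- stated objective: simpler
-- what changed: Replaces A's while-loop with divmod(q,-6) plus a carry fix, an accumulator appended least-significant-first and a slice reversal by a recursion that takes the digit directly as the nonnegative remainder q % 6 with quotient (r - q)//6 and emits the digit string most-significant-first, the final quotient becoming the base case, so the accumulator, the reversal and the carry-fix branch all disappear.
import Mathlib
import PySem

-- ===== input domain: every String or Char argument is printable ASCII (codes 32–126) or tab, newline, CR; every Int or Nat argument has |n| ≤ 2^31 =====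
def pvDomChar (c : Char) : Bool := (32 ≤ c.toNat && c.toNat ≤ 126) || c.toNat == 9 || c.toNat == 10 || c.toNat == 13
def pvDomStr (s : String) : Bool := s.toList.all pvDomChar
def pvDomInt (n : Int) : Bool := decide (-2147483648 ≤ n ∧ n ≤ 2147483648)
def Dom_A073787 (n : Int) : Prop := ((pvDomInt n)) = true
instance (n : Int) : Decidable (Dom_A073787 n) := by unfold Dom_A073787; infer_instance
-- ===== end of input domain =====

-- B replaces A's divmod(q,-6)-with-carry-fix accumulate-then-reverse loop by a recursion
-- taking the digit as q % 6 with quotient (r - q)//6, emitted most-significant-first: simpler.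

-- ===== PORT A =====
-- the while loop: state (s, q); returns the final (s, q).  The fuel argument is only
-- a totality guard: fuel |n|+2 strictly dominates the loop's decreasing measure
-- (see pvMeasure below), so the 0-fuel branch is never reached.
def A073787_loop (fuel : Nat) (s : List Char) (q : Int) : List Char × Int :=
  match fuel with
  | 0 => (s, q)
  | fuel + 1 =>
    if 6 ≤ q ∨ q < 0 then
      let q1 := PySem.Int.floordiv q (-6)
      let r1 := PySem.Int.mod q (-6)
      let q2 := if r1 < 0 then q1 + 1 else q1
      let r2 := if r1 < 0 then r1 + 6 else r1
      A073787_loop fuel (s ++ PySem.Int.toChars r2) q2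
    else (s, q)

-- int(str(q) + s[::-1]); the string is always a nonempty decimal numeral, so
-- int() never raises and the `.getD 0` default is never used
def A073787 (n : Int) : Int :=
  match A073787_loop (n.natAbs + 2) [] n with
  | (s, q) => (PySem.Int.ofChars? (PySem.Int.toChars q ++ s.reverse)).getD 0

-- ===== PORT B =====
-- helper digs: the digit string, most-significant digit first; digit is q % 6,
-- next quotient (r - q) // 6.  Fuel is a pure totality guard, never exhausted
-- for the fuel A073787_alt passes.
def A073787_altDigs (fuel : Nat) (q : Int) : List Char :=
  match fuel with
  | 0 => PySem.Int.toChars q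
  | fuel + 1 =>
    if 0 ≤ q ∧ q < 6 then PySem.Int.toChars q
    else
      let r := PySem.Int.mod q 6
      A073787_altDigs fuel (PySem.Int.floordiv (r - q) 6) ++ PySem.Int.toChars r

-- int(digs(n)); as in A, the argument is always a valid numeral so `.getD 0` is never used
def A073787_alt (n : Int) : Int :=
  (PySem.Int.ofChars? (A073787_altDigs (n.natAbs + 2) n)).getD 0

-- ===== PRECONDITION & SPEC =====
def Spec_A073787 (n : Int) (out : Int) : Prop := out = A073787_alt n
instance (n : Int) (out : Int) : Decidable (Spec_A073787 n out) := by unfold Spec_A073787; infer_instance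

-- ===== CLAIM (what is proved, stated in full; the proofs are below) =====
def Claim_equal_A073787 : Prop := ∀ (n : Int), Dom_A073787 n → Spec_A073787 n (A073787 n)

-- ===== LEMMAS AND PROOFS =====

-- the loop measure: strictly decreases at every iteration of either recursion
def pvMeasure (q : Int) : Nat := if q < 0 then q.natAbs + 1 else q.natAbs

-- A's carry-fixed divmod(q, -6) yields exactly B's pair (q % 6, (q % 6 - q) // 6)
lemma carry_eq_mod6 (q : Int) :
    (if PySem.Int.mod q (-6) < 0 then PySem.Int.mod q (-6) + 6 else PySem.Int.mod q (-6))
      = PySem.Int.mod q 6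
    ∧ (if PySem.Int.mod q (-6) < 0 then PySem.Int.floordiv q (-6) + 1 else PySem.Int.floordiv q (-6))
      = PySem.Int.floordiv (PySem.Int.mod q 6 - q) 6 := by
  have h1 := PySem.Int.floordiv_mul_add_mod q (-6)
  have h2 := PySem.Int.mod_neg_bounds (a := q) (b := -6) (by norm_num)
  have h3 := PySem.Int.floordiv_mul_add_mod q 6
  have h4 := PySem.Int.mod_nonneg (a := q) (b := 6) (by norm_num)
  have h5 := PySem.Int.mod_lt (a := q) (b := 6) (by norm_num)
  have h6 := PySem.Int.floordiv_mul_add_mod (PySem.Int.mod q 6 - q) 6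
  have h7 := PySem.Int.mod_nonneg (a := PySem.Int.mod q 6 - q) (b := 6) (by norm_num)
  have h8 := PySem.Int.mod_lt (a := PySem.Int.mod q 6 - q) (b := 6) (by norm_num)
  constructor <;> split_ifs <;> omega

-- a digit 0..5 prints as a single character, hence is its own reverse
lemma toChars_digit_reverse (r : Int) (h0 : 0 ≤ r) (h5 : r < 6) :
    (PySem.Int.toChars r).reverse = PySem.Int.toChars r := by
  interval_cases r <;> rfl

-- B's digit string equals A's (leading digit ++ reversed accumulator), for any
-- accumulator and any sufficient fuel
lemma altDigs_eq_loop (fuel : Nat) : ∀ (q : Int) (s : List Char), pvMeasure q < fuel →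
    A073787_altDigs fuel q ++ s.reverse
      = PySem.Int.toChars (A073787_loop fuel s q).2 ++ ((A073787_loop fuel s q).1).reverse := by
  induction fuel with
  | zero => intro q s h; omega
  | succ fuel ih =>
    intro q s hfuel
    rw [A073787_altDigs, A073787_loop]
    by_cases hq : 0 ≤ q ∧ q < 6
    · simp only [if_pos hq, if_neg (by omega : ¬ (6 ≤ q ∨ q < 0))]
    · simp only [if_neg hq, if_pos (by omega : (6 ≤ q ∨ q < 0))]
      obtain ⟨hr, hqq⟩ := carry_eq_mod6 q
      have h2 := PySem.Int.mod_neg_bounds (a := q) (b := -6) (by norm_num)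
      set q1 := PySem.Int.floordiv q (-6) with hq1
      set r1 := PySem.Int.mod q (-6) with hr1
      set q2 := if r1 < 0 then q1 + 1 else q1 with hq2
      set r2 := if r1 < 0 then r1 + 6 else r1 with hr2
      have hrev : (PySem.Int.toChars r2).reverse = PySem.Int.toChars r2 := by
        apply toChars_digit_reverse <;> rw [hr2] <;> split_ifs <;> omega
      have hm : pvMeasure q2 < fuel := by
        have h1 := PySem.Int.floordiv_mul_add_mod q (-6)
        have hmq : pvMeasure q < fuel + 1 := hfuel
        unfold pvMeasure at hmq ⊢
        rw [hq2]; split_ifs at hmq ⊢ <;> omega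
      have := ih q2 (s ++ PySem.Int.toChars r2) hm
      rw [List.reverse_append, hrev] at this
      rw [← hqq, ← hr]
      simpa [List.append_assoc] using this

-- ===== VERDICT (by name: the statement is the Claim_ definition above) =====
theorem A073787_spec : Claim_equal_A073787 := by
  intro n _
  unfold Spec_A073787 A073787 A073787_alt
  have h := altDigs_eq_loop (n.natAbs + 2) n []
    (by unfold pvMeasure; split_ifs <;> omega)
  rcases hl : A073787_loop (n.natAbs + 2) [] n with ⟨s, q⟩
  rw [hl] at h
  simp only [List.reverse_nil, List.append_nil] at h
  rw [h]
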